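-- pv_equiv track=rewrite | github.com/posl/comment_recommendation | script/mod_gen/1_time/en/115_D/4.py | burger
-- ===== SOURCE A (Python) =====
-- def burger(N, X):
--     if N == 0:
--         return 1 if X > 0 else 0
--     if X == 1:
--         return 0
--     L = 2 ** (N + 1) - 3
--     if X <= L // 2 + 1:
--         return burger(N - 1, X - 1)
--     if X == L // 2 + 2:
--         return 2 ** (N - 1)
--     return 2 ** (N - 1) + burger(N - 1, X - L // 2 - 2)
-- ===== SOURCE B (Python) =====
-- def burger(N, X):
--     total = 0
--     for k in range(N, 0, -1):
--         t = 2 ** k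
--         if X == 1:
--             return total
--         if X == t:
--             return total + t // 2
--         if X > t:
--             total += t // 2
--             X -= t
--         else:
--             X -= 1
--     return total + (1 if X > 0 else 0)
-- ===== Notes on version B (the rewrite author's own statement) =====
-- stated objective: alternative
-- what changed: Replaced the linear recursion on N by an iterative for-loop over range(N,0,-1) threading an accumulator, with the per-level size computed directly as the power 2**k (equality checked before the > branch) instead of A's L = 2**(N+1)-3 and two floor divisions per level.
-- intended difference: For N < 0 with X == 1 A's early X == 1 check returns 0 before the degenerate level is handled, while B's loop never runs and returns 1, consistent with A's own N == 0 base (X == 1 on a single patty yields 1), so B's value is the intended one. — e.g. on burger(-3, 1): A returns 0, B returns 1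
-- outside the precondition, e.g. on burger(-2, 0): A returns 0.125, B returns 0
import Mathlib
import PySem

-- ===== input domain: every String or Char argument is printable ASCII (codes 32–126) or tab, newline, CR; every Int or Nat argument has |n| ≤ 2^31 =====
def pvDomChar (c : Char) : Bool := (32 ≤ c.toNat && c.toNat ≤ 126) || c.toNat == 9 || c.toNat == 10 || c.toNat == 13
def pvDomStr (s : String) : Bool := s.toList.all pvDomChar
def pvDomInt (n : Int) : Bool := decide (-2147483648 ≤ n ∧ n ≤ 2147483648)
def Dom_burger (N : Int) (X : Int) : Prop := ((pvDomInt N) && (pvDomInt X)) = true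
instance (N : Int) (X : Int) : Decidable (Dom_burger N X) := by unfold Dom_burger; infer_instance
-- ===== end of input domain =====

-- B replaces A's linear recursion by a for-loop over range(N,0,-1) with an accumulator and direct power-of-two level sizes; same O(N) cost (objective: alternative).


-- ===== PORT A =====
-- A's recursion, fuel-indexed by the (nonnegative) N; for N = n+1 the Python's N-1 is n
-- and 2**(N+1) is 2^(n+2).  L > 0, so Python's '//' is PySem.Int.floordiv, exact.
def burgerA : Nat → Int → Int
  | 0, X => if X > 0 then 1 else 0
  | n+1, X =>
    if X = 1 then 0
    else
      let L : Int := 2 ^ (n + 2) - 3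
      if X ≤ PySem.Int.floordiv L 2 + 1 then burgerA n (X - 1)
      else if X = PySem.Int.floordiv L 2 + 2 then 2 ^ n
      else 2 ^ n + burgerA n (X - PySem.Int.floordiv L 2 - 2)

def burger (N : Int) (X : Int) : Int :=
  -- N < 0: Python A returns 0 only via the X == 1 check, then recurses forever; the
  -- 'if N < 0 then 0' guard is a totality guard, exact on the admitted inputs (Pre_).
  if N < 0 then 0 else burgerA N.toNat X

-- ===== PORT B =====
-- B's for-loop over range(N, 0, -1): structural recursion on that list, state = (X, total).
-- Each k drawn from the range satisfies k ≥ 1, so Python's 2 ** k is 2 ^ k.toNat, exact.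
def burgerLoop : List Int → Int → Int → Int
  | [], X, total => total + (if X > 0 then 1 else 0)
  | k :: ks, X, total =>
    let t : Int := 2 ^ k.toNat
    if X = t then total + PySem.Int.floordiv t 2
    else if X = 1 then total
    else if X > t then burgerLoop ks (X - t) (total + PySem.Int.floordiv t 2)
    else burgerLoop ks (X - 1) total

def burger_alt (N : Int) (X : Int) : Int :=
  burgerLoop (PySem.List.pyRange N 0 (-1)) X 0

-- ===== PRECONDITION & SPEC =====
-- Pre_ excludes the inputs with N < 0 and X ≠ 1, where Python A either recurses forever
-- (RecursionError) or, via 2**(N-1), returns a float rather than an int (e.g. 0.125 at (-2, 0)).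
def Pre_burger (N : Int) (X : Int) : Prop := 0 ≤ N ∨ X = 1
instance (N : Int) (X : Int) : Decidable (Pre_burger N X) := by unfold Pre_burger; infer_instance
def pvWitness_burger : Int × Int := (3, 5)

-- For N < 0 with X == 1, A's X == 1 early-exit fires before the degenerate level is handled and
-- returns 0; B's loop never runs and returns 1, consistent with A's own N == 0 base where X == 1
-- (one layer eaten of a single-patty burger) yields 1, so B's value is the intended one.
def D_burger (N : Int) (X : Int) : Prop := N < 0 ∧ X = 1
instance (N : Int) (X : Int) : Decidable (D_burger N X) := by unfold D_burger; infer_instance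

def Spec_burger (N : Int) (X : Int) (out : Int) : Prop := ¬ D_burger N X → out = burger_alt N X
instance (N : Int) (X : Int) (out : Int) : Decidable (Spec_burger N X out) := by unfold Spec_burger; infer_instance

def pvDiffWitness_burger : Int × Int := (-3, 1)
def pvDiffWitnessOut_burger : Int × Int := (0, 1)

-- ===== CLAIM (what is proved, stated in full; the proofs are below) =====
def Claim_unchanged_burger : Prop := ∀ (N : Int) (X : Int), Dom_burger N X → Pre_burger N X → Spec_burger N X (burger N X)
def Claim_changed_burger : Prop := Dom_burger (pvDiffWitness_burger.1) (pvDiffWitness_burger.2) ∧ Pre_burger (pvDiffWitness_burger.1) (pvDiffWitness_burger.2) ∧ D_burger (pvDiffWitness_burger.1) (pvDiffWitness_burger.2) ∧ burger (pvDiffWitness_burger.1) (pvDiffWitness_burger.2) = pvDiffWitnessOut_burger.1 ∧ burger_alt (pvDiffWitness_burger.1) (pvDiffWitness_burger.2) = pvDiffWitnessOut_burger.2 ∧ pvDiffWitnessOut_burger.1 ≠ pvDiffWitnessOut_burger.2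
def Claim_exact_burger : Prop := ∀ (N : Int) (X : Int), Dom_burger N X → Pre_burger N X → D_burger N X → burger N X ≠ burger_alt N X

-- ===== LEMMAS AND PROOFS =====
-- Python's (2^(n+2) - 3) // 2 evaluates to 2^(n+1) - 2 (the dividend is odd and positive).
theorem floordiv_L (n : Nat) :
    PySem.Int.floordiv ((2 : Int) ^ (n + 2) - 3) 2 = 2 ^ (n + 1) - 2 := by
  have h : (2 : Int) ^ (n + 2) - 3 = 1 + 2 * (2 ^ (n + 1) - 2) := by ring
  rw [PySem.Int.floordiv, h, Int.add_mul_fdiv_left _ _ (by norm_num : (2:Int) ≠ 0),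
    show Int.fdiv 1 2 = 0 from rfl]
  ring

theorem floordiv_pow (n : Nat) :
    PySem.Int.floordiv ((2 : Int) ^ (n + 1)) 2 = 2 ^ n := by
  have h : (2 : Int) ^ (n + 1) = 0 + 2 * 2 ^ n := by ring
  rw [PySem.Int.floordiv, h, Int.add_mul_fdiv_left _ _ (by norm_num : (2:Int) ≠ 0)]
  norm_num

-- Loop invariant: running B's loop from level n with accumulator 'total' adds A's value.
theorem burgerLoop_eq (n : Nat) : ∀ (X total : Int),
    burgerLoop (PySem.List.pyRange (n : Int) 0 (-1)) X total = total + burgerA n X := by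
  induction n with
  | zero =>
    intro X total
    rw [PySem.List.pyRange_neg_one_eq_nil (by norm_num)]
    simp [burgerLoop, burgerA]
  | succ n ih =>
    intro X total
    rw [PySem.List.pyRange_neg_one_cons (by positivity)]
    have hcast : ((n : Int) + 1) - 1 = (n : Int) := by ring
    have htn : (((n : Int) + 1)).toNat = n + 1 := by omega
    simp only [Nat.cast_succ, hcast, burgerLoop, htn, burgerA, floordiv_L, floordiv_pow]
    have hpow : (0 : Int) < 2 ^ n := by positivity
    by_cases hx1 : X = 1
    · rw [if_neg (by omega), if_pos hx1, if_pos hx1]; ring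
    · rcases lt_trichotomy X ((2 : Int) ^ (n + 1)) with hlt | heq | hgt
      · rw [if_neg (by omega), if_neg hx1, if_neg (by omega), if_neg hx1,
          if_pos (by omega), ih]
      · rw [if_pos heq, if_neg hx1, if_neg (by omega), if_pos (by omega)]
      · rw [if_neg (by omega), if_neg hx1, if_pos hgt, if_neg hx1, if_neg (by omega),
          if_neg (by omega), ih]
        have harg : X - 2 ^ (n + 1) = X - (2 ^ (n + 1) - 2) - 2 := by ring
        rw [harg]; ring

-- ===== VERDICT (by name: the statement is the Claim_ definition above) =====
theorem burger_spec : Claim_unchanged_burger := by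
  intro N X _ hpre hnd
  unfold burger burger_alt
  split_ifs with h
  · exfalso; unfold Pre_burger at hpre; unfold D_burger at hnd; omega
  · have hN : ((N.toNat : Int)) = N := by omega
    rw [← hN, burgerLoop_eq, Int.toNat_natCast]; omega

theorem burger_changed : Claim_changed_burger := by unfold Claim_changed_burger; decide

theorem burger_tight : Claim_exact_burger := by
  intro N X _ _ hd
  obtain ⟨hn, hx⟩ := hd
  unfold burger burger_alt
  subst hx
  rw [if_pos hn, PySem.List.pyRange_neg_one_eq_nil (by omega)]
  simp [burgerLoop]
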